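-- pv_equiv track=rewrite | github.com/NguyenAnhKhoa02/EnglishNotePlus | EnglistNotePlus/Core/Core_Text.py | convertFromChatToSearch
-- ===== SOURCE A (Python) =====
-- def getListBracket(text : str) -> list:
--     listBrackets = list()
--
--     coupleBracket = list()
--     openBrakcet = 0
--     for index in range(text.__len__()):
--         if text[index].__eq__("("):
--             if openBrakcet == 0:
--                 coupleBracket.append(index)
--                 openBrakcet += 1
--             else:
--                 openBrakcet += 1
--         if text[index].__eq__(")"):
--            if openBrakcet == 1:
--                coupleBracket.append(index)
--                listBrackets.append(coupleBracket)
--                openBrakcet = 0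
--                coupleBracket = list()
--            elif openBrakcet > 1:
--                openBrakcet -= 1
--
--     return listBrackets
--
-- def convertFromChatToSearch(text : str) -> str:
--     __l_LIST_waitConvert = text.split("\n")
--
--     for count in range(__l_LIST_waitConvert.__len__()):
--         __l_STR_convert = __l_LIST_waitConvert[count]
--
--         if __l_STR_convert.startswith("-"):
--             __l_LIST_brakcets = getListBracket(__l_STR_convert)
--
--             if len(__l_LIST_brakcets) > 0:
--                 __l_STR_convert = __l_STR_convert[:__l_LIST_brakcets[-1][0]] + "\n" + " " + __l_STR_convert[__l_LIST_brakcets[-1][0] + 1 :]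
--                 __l_STR_convert = __l_STR_convert[:__l_LIST_brakcets[-1][1] + 1] + "\n"
--
--             __l_LIST_waitConvert[count] = __l_STR_convert
--
--     return "\n".join(__l_LIST_waitConvert)
-- ===== SOURCE B (Python) =====
-- def convertFromChatToSearch(text: str) -> str:
--     return "\n".join(_fix(line) for line in text.split("\n"))
--
-- def _fix(line: str) -> str:
--     if not line.startswith("-"):
--         return line
--     p = _last_pair(line)
--     if p is None:
--         return line
--     a, b = p
--     return line[:a] + "\n " + line[a + 1:b] + "\n"
--
-- def _last_pair(s: str):
--     # recursive descent: last completed top-level '(...)' pair of s as (open, close), else None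
--     if s == "":
--         return None
--     if s[0] == "(":
--         m = _match(s[1:])
--         if m is None:
--             return None
--         b = 1 + m
--         later = _last_pair(s[b + 1:])
--         if later is None:
--             return (0, b)
--         return (b + 1 + later[0], b + 1 + later[1])
--     later = _last_pair(s[1:])
--     return None if later is None else (later[0] + 1, later[1] + 1)
--
-- def _match(s: str):
--     # index in s of the ')' closing an already-open '(' (nested pairs consumed recursively), else None
--     if s == "":
--         return None
--     if s[0] == ")":
--         return 0
--     if s[0] == "(":
--         m = _match(s[1:])
--         if m is None:
--             return None
--         m2 = _match(s[m + 2:])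
--         return None if m2 is None else m + 2 + m2
--     m = _match(s[1:])
--     return None if m is None else 1 + m
-- ===== Notes on version B (the rewrite author's own statement) =====
-- stated objective: alternative
-- what changed: B replaces A's indexed left-to-right scan with an open-bracket counter (helper getListBracket collecting ALL top-level pairs, then a two-step index-shifting slice surgery) by a loop-free recursive-descent parser: nested parentheses are consumed by recursion instead of a depth counter, the last top-level pair falls out of the recursion on the string, and the line is rebuilt in one expression.
import Mathlib
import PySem

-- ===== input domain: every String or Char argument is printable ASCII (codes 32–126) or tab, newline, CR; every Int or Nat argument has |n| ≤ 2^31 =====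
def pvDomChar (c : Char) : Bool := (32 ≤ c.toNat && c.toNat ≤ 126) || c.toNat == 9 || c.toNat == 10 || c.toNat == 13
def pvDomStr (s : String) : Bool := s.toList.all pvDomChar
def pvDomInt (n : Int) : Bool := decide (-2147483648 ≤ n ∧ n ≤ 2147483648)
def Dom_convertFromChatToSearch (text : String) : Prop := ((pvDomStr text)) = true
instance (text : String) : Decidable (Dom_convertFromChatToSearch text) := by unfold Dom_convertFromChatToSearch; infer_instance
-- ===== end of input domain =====

-- B replaces A's indexed scan with an open-bracket counter (helper getListBracket collecting
-- ALL top-level pairs, then a two-step index-shifting reformat) by a loop-free recursive-descent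
-- parser: nesting is consumed by recursion, the last top-level pair falls out of the recursion
-- on the string, and the line is rebuilt in one expression (objective: alternative).

-- ===== PORT A =====
-- A's helper getListBracket: for index in range(len(text)): track (listBrackets, coupleBracket, openBracket)
def getListBracket (cs : List Char) : List (List Int) :=
  ((PySem.List.pyRange 0 cs.length 1).foldl
    (fun (st : List (List Int) × List Int × Int) index =>
      let ch := PySem.List.pyGetD cs index ' '
      -- if text[index] == "(":
      let st1 : List (List Int) × List Int × Int :=
        if ch = '(' then
          if st.2.2 = 0 then (st.1, st.2.1 ++ [index], st.2.2 + 1)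
          else (st.1, st.2.1, st.2.2 + 1)
        else st
      -- if text[index] == ")":
      if ch = ')' then
        if st1.2.2 = 1 then (st1.1 ++ [st1.2.1 ++ [index]], ([] : List Int), (0 : Int))
        else if st1.2.2 > 1 then (st1.1, st1.2.1, st1.2.2 - 1)
        else st1
      else st1)
    ([], [], 0)).1

def convertFromChatToSearch (text : String) : String :=
  let waitConvert := PySem.Chars.splitOn text.toList ['\n']
  -- for count in range(len(waitConvert)): waitConvert[count] is read, transformed, written back
  let waitConvert := (PySem.List.pyRange 0 waitConvert.length 1).foldl
    (fun ws count =>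
      let conv := PySem.List.pyGetD ws count []
      if PySem.Chars.startswith conv ['-'] then
        let brackets := getListBracket conv
        let conv :=
          if brackets.length > 0 then
            -- conv = conv[:br[-1][0]] + "\n" + " " + conv[br[-1][0]+1:]
            let conv1 := PySem.List.slice conv none (some (PySem.List.pyGetD (PySem.List.pyGetD brackets (-1) []) 0 0))
              ++ ['\n'] ++ [' ']
              ++ PySem.List.slice conv (some (PySem.List.pyGetD (PySem.List.pyGetD brackets (-1) []) 0 0 + 1)) none
            -- conv = conv[:br[-1][1]+1] + "\n"
            PySem.List.slice conv1 none (some (PySem.List.pyGetD (PySem.List.pyGetD brackets (-1) []) 1 0 + 1)) ++ ['\n']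
          else conv
        PySem.List.pySetD ws count conv
      else ws)
    waitConvert
  String.ofList (PySem.Chars.join ['\n'] waitConvert)

-- ===== PORT B =====
-- Source B's _match(s): index in s of the ')' closing an already-open '(' (nested pairs consumed
-- recursively), else None; recursion on s[1:] / s[m+2:] becomes structural recursion on the list.
def pvMatchB (s : List Char) : Option Nat :=
  match s with
  | [] => none
  | c :: cs =>
    if c = ')' then some 0
    else if c = '(' then
      match pvMatchB cs with
      | none => none
      | some m =>
        match pvMatchB (List.drop (m + 2) (c :: cs)) with
        | none => none
        | some m2 => some (m + 2 + m2)
    else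
      match pvMatchB cs with
      | none => none
      | some m => some (1 + m)
termination_by s.length
decreasing_by all_goals (simp; try omega)

-- Source B's _last_pair(s): last completed top-level '(...)' pair as (open, close), else None
def pvLastB (s : List Char) : Option (Nat × Nat) :=
  match s with
  | [] => none
  | c :: cs =>
    if c = '(' then
      match pvMatchB cs with
      | none => none
      | some m =>
        let b := 1 + m
        match pvLastB (List.drop (b + 1) (c :: cs)) with
        | none => some (0, b)
        | some (x, y) => some (b + 1 + x, b + 1 + y)
    else
      match pvLastB cs with
      | none => none
      | some (x, y) => some (x + 1, y + 1)
termination_by s.length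
decreasing_by all_goals (simp; try omega)

-- Source B's _fix(line)
def pvFixB (cs : List Char) : List Char :=
  if PySem.Chars.startswith cs ['-'] then
    match pvLastB cs with
    | none => cs
    | some (a, b) =>
        PySem.List.slice cs none (some (a : Int)) ++ ['\n', ' ']
          ++ PySem.List.slice cs (some ((a : Int) + 1)) (some (b : Int)) ++ ['\n']
  else cs

def convertFromChatToSearch_alt (text : String) : String :=
  String.ofList (PySem.Chars.join ['\n'] ((PySem.Chars.splitOn text.toList ['\n']).map pvFixB))

-- ===== PRECONDITION & SPEC =====
def Spec_convertFromChatToSearch (text : String) (out : String) : Prop := out = convertFromChatToSearch_alt text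
instance (text : String) (out : String) : Decidable (Spec_convertFromChatToSearch text out) := by unfold Spec_convertFromChatToSearch; infer_instance

-- ===== CLAIM (what is proved, stated in full; the proofs are below) =====
def Claim_equal_convertFromChatToSearch : Prop := ∀ (text : String), Dom_convertFromChatToSearch text → Spec_convertFromChatToSearch text (convertFromChatToSearch text)

-- ===== LEMMAS AND PROOFS =====

-- A's per-line transformation, factored out of A's fold body for the proof.
def pvLineA (conv : List Char) : List Char :=
  if PySem.Chars.startswith conv ['-'] then
    let brackets := getListBracket conv
    if brackets.length > 0 then
      let conv1 := PySem.List.slice conv none (some (PySem.List.pyGetD (PySem.List.pyGetD brackets (-1) []) 0 0))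
        ++ ['\n'] ++ [' ']
        ++ PySem.List.slice conv (some (PySem.List.pyGetD (PySem.List.pyGetD brackets (-1) []) 0 0 + 1)) none
      PySem.List.slice conv1 none (some (PySem.List.pyGetD (PySem.List.pyGetD brackets (-1) []) 1 0 + 1)) ++ ['\n']
    else conv
  else conv

-- the body of A's index loop, named for the proofs (definitionally the port's lambda)
def pvBodyA (ws : List (List Char)) (count : Int) : List (List Char) :=
  let conv := PySem.List.pyGetD ws count []
  if PySem.Chars.startswith conv ['-'] then
    let brackets := getListBracket conv
    let conv :=
      if brackets.length > 0 then
        let conv1 := PySem.List.slice conv none (some (PySem.List.pyGetD (PySem.List.pyGetD brackets (-1) []) 0 0))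
          ++ ['\n'] ++ [' ']
          ++ PySem.List.slice conv (some (PySem.List.pyGetD (PySem.List.pyGetD brackets (-1) []) 0 0 + 1)) none
        PySem.List.slice conv1 none (some (PySem.List.pyGetD (PySem.List.pyGetD brackets (-1) []) 1 0 + 1)) ++ ['\n']
      else conv
    PySem.List.pySetD ws count conv
  else ws

theorem pvBodyA_eq (ws : List (List Char)) (count : Int) :
    pvBodyA ws count
      = (if PySem.Chars.startswith (PySem.List.pyGetD ws count []) ['-'] then
          PySem.List.pySetD ws count (pvLineA (PySem.List.pyGetD ws count []))
        else ws) := by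
  unfold pvBodyA pvLineA
  by_cases hst : PySem.Chars.startswith (PySem.List.pyGetD ws count []) ['-'] <;> simp [hst]

-- invariant: after n steps the first n lines are rewritten, the rest untouched
theorem pvFoldA_aux (l : List (List Char)) : ∀ n : Nat, n ≤ l.length →
    (PySem.List.pyRange 0 n 1).foldl pvBodyA l = (l.take n).map pvLineA ++ l.drop n := by
  intro n
  induction n with
  | zero => intro _; simp [PySem.List.pyRange_one_eq_nil]
  | succ n ih =>
      intro hn
      have hlt : n < l.length := by omega
      rw [show ((n + 1 : Nat) : Int) = (n : Int) + 1 by push_cast; ring,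
          PySem.List.pyRange_one_succ_right (by positivity), List.foldl_append, ih (by omega)]
      simp only [List.foldl_cons, List.foldl_nil]
      have hX : ((l.take n).map pvLineA).length = n := by
        simp [List.length_take]; omega
      rw [List.drop_eq_getElem_cons hlt]
      have hget : PySem.List.pyGetD ((l.take n).map pvLineA ++ l[n] :: l.drop (n + 1)) (n : Int) []
          = l[n] := by
        rw [PySem.List.pyGetD_natCast]
        rw [List.getD_eq_getElem?_getD]
        rw [List.getElem?_append_right (by omega), hX]
        simp [List.getElem?_eq_getElem hlt]
      rw [pvBodyA_eq, hget]
      have hmesh : List.map pvLineA (List.take (n + 1) l)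
          = List.map pvLineA (List.take n l) ++ [pvLineA l[n]] := by
        rw [List.take_succ_eq_append_getElem hlt, List.map_append]; rfl
      by_cases hst : PySem.Chars.startswith l[n] ['-']
      · rw [if_pos hst]
        have hset : PySem.List.pySetD ((l.take n).map pvLineA ++ l[n] :: l.drop (n + 1)) (n : Int)
            (pvLineA l[n])
            = (l.take n).map pvLineA ++ pvLineA l[n] :: l.drop (n + 1) := by
          simp only [PySem.List.pySetD, PySem.List.pySet?, PySem.List.pyIdx?]
          rw [if_pos (by positivity), if_pos (by simp [List.length_take]; omega)]
          simp only [Option.map_some, Option.getD_some, Int.toNat_natCast]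
          rw [List.set_append, hX]
          rw [if_neg (by omega)]
          simp only [Nat.sub_self, List.set_cons_zero]
        rw [hset, hmesh, List.append_assoc]
        rfl
      · rw [if_neg hst]
        have hmap : pvLineA l[n] = l[n] := by simp [pvLineA, hst]
        rw [hmesh, hmap, List.append_assoc]
        rfl

-- A's index loop "for count in range(len(ws)): ws[count] = f(ws[count])" is List.map pvLineA.
theorem pvFoldA_eq_map (l : List (List Char)) :
    (PySem.List.pyRange 0 l.length 1).foldl
      (fun ws count =>
        let conv := PySem.List.pyGetD ws count []
        if PySem.Chars.startswith conv ['-'] then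
          let brackets := getListBracket conv
          let conv :=
            if brackets.length > 0 then
              let conv1 := PySem.List.slice conv none (some (PySem.List.pyGetD (PySem.List.pyGetD brackets (-1) []) 0 0))
                ++ ['\n'] ++ [' ']
                ++ PySem.List.slice conv (some (PySem.List.pyGetD (PySem.List.pyGetD brackets (-1) []) 0 0 + 1)) none
              PySem.List.slice conv1 none (some (PySem.List.pyGetD (PySem.List.pyGetD brackets (-1) []) 1 0 + 1)) ++ ['\n']
            else conv
          PySem.List.pySetD ws count conv
        else ws)
      l = l.map pvLineA := by
  have h := pvFoldA_aux l l.length le_rfl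
  rw [List.take_length, List.drop_length, List.append_nil] at h
  exact h

-- generic bridge: a loop "for i in range(len(l)): ... l[i] ..." equals a fold over enumerate(l)
theorem pvEnumerate_append {α : Type} (xs ys : List α) (s : Int) :
    PySem.List.enumerate (xs ++ ys) s
      = PySem.List.enumerate xs s ++ PySem.List.enumerate ys (s + xs.length) := by
  induction xs generalizing s with
  | nil => simp [PySem.List.enumerate]
  | cons x xs ih =>
      simp only [List.cons_append, PySem.List.enumerate_cons, ih, List.length_cons]
      rw [show s + 1 + (xs.length : Int) = s + ((xs.length : Int) + 1) by ring]
      push_cast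
      ring_nf

theorem pvFoldIdx_eq_enumerate {σ : Type} (l : List Char) (g : σ → Int → Char → σ) (init : σ) (d : Char) :
    (PySem.List.pyRange 0 l.length 1).foldl (fun acc j => g acc j (PySem.List.pyGetD l j d)) init
      = (PySem.List.enumerate l 0).foldl (fun acc p => g acc p.1 p.2) init := by
  induction l using List.reverseRecOn generalizing init with
  | nil => rfl
  | append_singleton l' x ih =>
      rw [pvEnumerate_append]
      rw [show ((l' ++ [x]).length : Int) = (l'.length : Int) + 1 by simp]
      rw [PySem.List.pyRange_one_succ_right (by positivity)]
      rw [List.foldl_append, List.foldl_append]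
      rw [PySem.List.foldl_congr_mem _ _
            (fun acc j => g acc j (PySem.List.pyGetD l' j d)) init
            (by
              intro acc j hj
              rw [PySem.List.mem_pyRange_one] at hj
              show g acc j (PySem.List.pyGetD (l' ++ [x]) j d) = g acc j (PySem.List.pyGetD l' j d)
              congr 1
              rw [PySem.List.pyGetD_eq_getElem _ d hj.1 (by simp; omega),
                  PySem.List.pyGetD_eq_getElem _ d hj.1 (by exact_mod_cast hj.2)]
              exact List.getElem_append_left (by omega)),
          ih]
      simp [PySem.List.enumerate, PySem.List.pyGetD_natCast]

-- the counter automaton the two sides are compared through (proof-only)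
def pvStepB (st : Option (Int × Int) × Int × Int) (p : Int × Char) : Option (Int × Int) × Int × Int :=
  if p.2 = '(' then (st.1, (if st.2.2 = 0 then p.1 else st.2.1), st.2.2 + 1)
  else if p.2 = ')' then
    if st.2.2 = 1 then (some (st.2.1, p.1), st.2.1, 0)
    else if st.2.2 > 1 then (st.1, st.2.1, st.2.2 - 1)
    else st
  else st

-- A's per-character step (definitionally the lambda in getListBracket's fold, index/char abstracted)
def pvStepA (st : List (List Int) × List Int × Int) (p : Int × Char) : List (List Int) × List Int × Int :=
  let st1 : List (List Int) × List Int × Int :=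
    if p.2 = '(' then
      if st.2.2 = 0 then (st.1, st.2.1 ++ [p.1], st.2.2 + 1)
      else (st.1, st.2.1, st.2.2 + 1)
    else st
  if p.2 = ')' then
    if st1.2.2 = 1 then (st1.1 ++ [st1.2.1 ++ [p.1]], ([] : List Int), (0 : Int))
    else if st1.2.2 > 1 then (st1.1, st1.2.1, st1.2.2 - 1)
    else st1
  else st1

-- the relation the A-fold's and the counter's states keep (s = next index to be processed)
def pvRel (s : Int) (stA : List (List Int) × List Int × Int) (stB : Option (Int × Int) × Int × Int) : Prop :=
  stA.2.2 = stB.2.2 ∧ 0 ≤ stB.2.2 ∧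
  (stB.2.2 = 0 → stA.2.1 = []) ∧
  (stB.2.2 ≠ 0 → stA.2.1 = [stB.2.1] ∧ 0 ≤ stB.2.1 ∧ stB.2.1 < s) ∧
  ((stA.1 = [] ∧ stB.1 = none) ∨
    ∃ a b lb', stA.1 = lb' ++ [[a, b]] ∧ stB.1 = some (a, b) ∧ 0 ≤ a ∧ a < b ∧ b < s)

theorem pvRel_mk (s : Int) (lb : List (List Int)) (cb : List Int) (ob : Int)
    (last : Option (Int × Int)) (o depth : Int) :
    pvRel s (lb, cb, ob) (last, o, depth) ↔
      (ob = depth ∧ 0 ≤ depth ∧ (depth = 0 → cb = []) ∧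
        (depth ≠ 0 → cb = [o] ∧ 0 ≤ o ∧ o < s) ∧
        ((lb = [] ∧ last = none) ∨
          ∃ a b lb', lb = lb' ++ [[a, b]] ∧ last = some (a, b) ∧ 0 ≤ a ∧ a < b ∧ b < s)) :=
  Iff.rfl

theorem pvStep_rel (s : Int) (c : Char) (stA : List (List Int) × List Int × Int)
    (stB : Option (Int × Int) × Int × Int) (hs : 0 ≤ s) (h : pvRel s stA stB) :
    pvRel (s + 1) (pvStepA stA (s, c)) (pvStepB stB (s, c)) := by
  obtain ⟨lb, cb, ob⟩ := stA
  obtain ⟨last, o, depth⟩ := stB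
  rw [pvRel_mk] at h
  obtain ⟨h1, h2, h3, h4, h5⟩ := h
  subst h1
  have h5' : (lb = [] ∧ last = none) ∨
      ∃ a b lb', lb = lb' ++ [[a, b]] ∧ last = some (a, b) ∧ 0 ≤ a ∧ a < b ∧ b < s + 1 := by
    rcases h5 with ⟨hA, hB⟩ | ⟨a, b, lb', hA, hB, ha, hab, hbnd⟩
    · exact Or.inl ⟨hA, hB⟩
    · exact Or.inr ⟨a, b, lb', hA, hB, ha, hab, by omega⟩
  by_cases hco : c = '('
  · subst hco
    by_cases hd : ob = 0
    · have hcb : cb = [] := h3 hd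
      have eA : pvStepA (lb, cb, ob) (s, '(') = (lb, [s], 1) := by
        simp [pvStepA, hd, hcb]
      have eB : pvStepB (last, o, ob) (s, '(') = (last, s, 1) := by
        simp [pvStepB, hd]
      rw [eA, eB, pvRel_mk]
      exact ⟨rfl, by omega, by omega, fun _ => ⟨rfl, hs, by omega⟩, h5'⟩
    · have eA : pvStepA (lb, cb, ob) (s, '(') = (lb, cb, ob + 1) := by
        simp [pvStepA, hd]
      have eB : pvStepB (last, o, ob) (s, '(') = (last, o, ob + 1) := by
        simp [pvStepB, hd]
      rw [eA, eB, pvRel_mk]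
      obtain ⟨c1, c2, c3⟩ := h4 hd
      exact ⟨rfl, by omega, by omega, fun _ => ⟨c1, c2, by omega⟩, h5'⟩
  · by_cases hcc : c = ')'
    · subst hcc
      by_cases hd1 : ob = 1
      · obtain ⟨c1, c2, c3⟩ := h4 (by omega)
        have eA : pvStepA (lb, cb, ob) (s, ')') = (lb ++ [[o, s]], [], 0) := by
          simp [pvStepA, hco, hd1, c1]
        have eB : pvStepB (last, o, ob) (s, ')') = (some (o, s), o, 0) := by
          simp [pvStepB, hco, hd1]
        rw [eA, eB, pvRel_mk]
        exact ⟨rfl, le_rfl, fun _ => rfl, by omega,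
          Or.inr ⟨o, s, lb, rfl, rfl, c2, c3, by omega⟩⟩
      · by_cases hd2 : ob > 1
        · have eA : pvStepA (lb, cb, ob) (s, ')') = (lb, cb, ob - 1) := by
            simp [pvStepA, hco, hd1, hd2]
          have eB : pvStepB (last, o, ob) (s, ')') = (last, o, ob - 1) := by
            simp [pvStepB, hco, hd1, hd2]
          rw [eA, eB, pvRel_mk]
          obtain ⟨c1, c2, c3⟩ := h4 (by omega)
          exact ⟨rfl, by omega, by omega, fun _ => ⟨c1, c2, by omega⟩, h5'⟩
        · have hd0 : ob = 0 := by omega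
          have eA : pvStepA (lb, cb, ob) (s, ')') = (lb, cb, ob) := by
            simp [pvStepA, hco, hd1, hd2]
          have eB : pvStepB (last, o, ob) (s, ')') = (last, o, ob) := by
            simp [pvStepB, hco, hd1, hd2]
          rw [eA, eB, pvRel_mk]
          exact ⟨rfl, h2, h3, fun hd => absurd hd0 (by omega), h5'⟩
    · have eA : pvStepA (lb, cb, ob) (s, c) = (lb, cb, ob) := by
        simp [pvStepA, hco, hcc]
      have eB : pvStepB (last, o, ob) (s, c) = (last, o, ob) := by
        simp [pvStepB, hco, hcc]
      rw [eA, eB, pvRel_mk]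
      refine ⟨rfl, h2, h3, fun hd => ?_, h5'⟩
      obtain ⟨c1, c2, c3⟩ := h4 hd
      exact ⟨c1, c2, by omega⟩

theorem pvInv (rest : List Char) (s : Int) (stA : List (List Int) × List Int × Int)
    (stB : Option (Int × Int) × Int × Int) (hs : 0 ≤ s) (h : pvRel s stA stB) :
    pvRel (s + rest.length) ((PySem.List.enumerate rest s).foldl pvStepA stA)
      ((PySem.List.enumerate rest s).foldl pvStepB stB) := by
  induction rest generalizing s stA stB with
  | nil => simpa using h
  | cons c rest ih =>
      simp only [PySem.List.enumerate_cons, List.foldl_cons, List.length_cons]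
      have := ih (s + 1) _ _ (by omega) (pvStep_rel s c stA stB hs h)
      simp only [Nat.cast_add, Nat.cast_one]
      rw [show s + ((rest.length : Int) + 1) = s + 1 + (rest.length : Int) by ring]
      exact this

-- unfolding lemmas for B's recursive-descent functions
theorem pvMatchB_cons (c : Char) (cs : List Char) :
    pvMatchB (c :: cs)
      = (if c = ')' then some 0
        else if c = '(' then
          match pvMatchB cs with
          | none => none
          | some m =>
            match pvMatchB (List.drop (m + 2) (c :: cs)) with
            | none => none
            | some m2 => some (m + 2 + m2)
        else
          match pvMatchB cs with
          | none => none
          | some m => some (1 + m)) := by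
  rw [pvMatchB]

theorem pvLastB_cons (c : Char) (cs : List Char) :
    pvLastB (c :: cs)
      = (if c = '(' then
          match pvMatchB cs with
          | none => none
          | some m =>
            match pvLastB (List.drop (1 + m + 1) (c :: cs)) with
            | none => some (0, 1 + m)
            | some (x, y) => some (1 + m + 1 + x, 1 + m + 1 + y)
        else
          match pvLastB cs with
          | none => none
          | some (x, y) => some (x + 1, y + 1)) := by
  rw [pvLastB]

-- counter semantics of _match: the fold at depth d ≥ 1 either never returns (no closer: last kept)
-- or jumps to just after the closing ')' of the innermost open paren
theorem pvMatch_fold : ∀ (n : Nat) (cs : List Char), cs.length ≤ n →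
    ∀ (d s : Int) (last : Option (Int × Int)) (o : Int), 1 ≤ d →
    ((pvMatchB cs = none →
        ((PySem.List.enumerate cs s).foldl pvStepB (last, o, d)).1 = last) ∧
     (∀ m : Nat, pvMatchB cs = some m →
        (PySem.List.enumerate cs s).foldl pvStepB (last, o, d)
          = (PySem.List.enumerate (cs.drop (m + 1)) (s + (m : Int) + 1)).foldl pvStepB
              (if d = 1 then (some (o, s + (m : Int)), o, 0) else (last, o, d - 1)))) := by
  intro n
  induction n with
  | zero =>
      intro cs hcs d s last o hd
      have hnil : cs = [] := List.eq_nil_of_length_eq_zero (by omega)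
      subst hnil
      exact ⟨fun _ => rfl, fun m hm => by simp [pvMatchB] at hm⟩
  | succ n ih =>
      intro cs hcs d s last o hd
      match cs with
      | [] => exact ⟨fun _ => rfl, fun m hm => by simp [pvMatchB] at hm⟩
      | c :: cs' =>
          have hlen' : cs'.length ≤ n := by simp at hcs; omega
          by_cases hc1 : c = ')'
          · subst hc1
            have hM : pvMatchB (')' :: cs') = some 0 := by rw [pvMatchB_cons]; simp
            constructor
            · intro h; rw [hM] at h; exact absurd h (by simp)
            · intro m hm
              rw [hM] at hm
              obtain rfl : (0 : Nat) = m := by injection hm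
              have hstep : pvStepB (last, o, d) (s, ')')
                  = (if d = 1 then (some (o, s), o, 0) else (last, o, d - 1)) := by
                by_cases hd1 : d = 1
                · simp [pvStepB, hd1]
                · simp [pvStepB, hd1, show d > 1 by omega]
              simp only [PySem.List.enumerate_cons, List.foldl_cons, hstep]
              norm_num
          · by_cases hc2 : c = '('
            · subst hc2
              have hstep : pvStepB (last, o, d) (s, '(')
                  = (last, o, d + 1) := by
                simp [pvStepB, show ¬ (d = 0) by omega]
              cases hm1 : pvMatchB cs' with
              | none =>
                  have hM : pvMatchB ('(' :: cs') = none := by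
                    rw [pvMatchB_cons]; simp [hm1]
                  constructor
                  · intro _
                    simp only [PySem.List.enumerate_cons, List.foldl_cons, hstep]
                    exact (ih cs' hlen' (d + 1) (s + 1) last o (by omega)).1 hm1
                  · intro m hm; rw [hM] at hm; exact absurd hm (by simp)
              | some m =>
                  have hdd : List.drop (m + 2) ('(' :: cs') = List.drop (m + 1) cs' := rfl
                  have hdn : (cs'.drop (m + 1)).length ≤ n :=
                    le_trans (by simp) hlen'
                  cases hm2 : pvMatchB (cs'.drop (m + 1)) with
                  | none =>
                      have hM : pvMatchB ('(' :: cs') = none := by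
                        rw [pvMatchB_cons]; simp [hm1, hdd, hm2]
                      constructor
                      · intro _
                        simp only [PySem.List.enumerate_cons, List.foldl_cons, hstep]
                        rw [(ih cs' hlen' (d + 1) (s + 1) last o (by omega)).2 m hm1,
                            if_neg (show ¬ (d + 1 = 1) by omega),
                            show d + 1 - 1 = d by ring]
                        exact (ih (cs'.drop (m + 1)) hdn d (s + 1 + (m : Int) + 1) last o hd).1 hm2
                      · intro m' hm'; rw [hM] at hm'; exact absurd hm' (by simp)
                  | some m2 =>
                      have hM : pvMatchB ('(' :: cs') = some (m + 2 + m2) := by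
                        rw [pvMatchB_cons]; simp [hm1, hdd, hm2]
                      constructor
                      · intro h; rw [hM] at h; exact absurd h (by simp)
                      · intro m' hm'
                        rw [hM] at hm'
                        obtain rfl : m + 2 + m2 = m' := by injection hm'
                        simp only [PySem.List.enumerate_cons, List.foldl_cons, hstep]
                        rw [(ih cs' hlen' (d + 1) (s + 1) last o (by omega)).2 m hm1,
                            if_neg (show ¬ (d + 1 = 1) by omega),
                            show d + 1 - 1 = d by ring,
                            (ih (cs'.drop (m + 1)) hdn d (s + 1 + (m : Int) + 1) last o hd).2 m2 hm2]
                        have e1 : ('(' :: cs').drop (m + 2 + m2 + 1)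
                            = (cs'.drop (m + 1)).drop (m2 + 1) := by
                          rw [List.drop_drop, show m + 2 + m2 + 1 = (m + 1 + m2 + 1) + 1 by omega]
                          rfl
                        have e2 : s + ((m + 2 + m2 : Nat) : Int) + 1
                            = s + 1 + (m : Int) + 1 + (m2 : Int) + 1 := by push_cast; ring
                        have e3 : s + 1 + (m : Int) + 1 + (m2 : Int)
                            = s + ((m + 2 + m2 : Nat) : Int) := by push_cast; ring
                        rw [e1, e2, e3]
            · have hstep : pvStepB (last, o, d) (s, c) = (last, o, d) := by
                simp [pvStepB, hc1, hc2]
              cases hm1 : pvMatchB cs' with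
              | none =>
                  have hM : pvMatchB (c :: cs') = none := by
                    rw [pvMatchB_cons]; simp [hc1, hc2, hm1]
                  constructor
                  · intro _
                    simp only [PySem.List.enumerate_cons, List.foldl_cons, hstep]
                    exact (ih cs' hlen' d (s + 1) last o hd).1 hm1
                  · intro m hm; rw [hM] at hm; exact absurd hm (by simp)
              | some m =>
                  have hM : pvMatchB (c :: cs') = some (1 + m) := by
                    rw [pvMatchB_cons]; simp [hc1, hc2, hm1]
                  constructor
                  · intro h; rw [hM] at h; exact absurd h (by simp)
                  · intro m' hm'
                    rw [hM] at hm'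
                    obtain rfl : 1 + m = m' := by injection hm'
                    simp only [PySem.List.enumerate_cons, List.foldl_cons, hstep]
                    rw [(ih cs' hlen' d (s + 1) last o hd).2 m hm1]
                    have e1 : (c :: cs').drop (1 + m + 1) = cs'.drop (m + 1) := by
                      rw [show 1 + m + 1 = (m + 1) + 1 by omega]; rfl
                    have e2 : s + ((1 + m : Nat) : Int) + 1 = s + 1 + (m : Int) + 1 := by
                      push_cast; ring
                    have e3 : s + ((1 + m : Nat) : Int) = s + 1 + (m : Int) := by
                      push_cast; ring
                    rw [e1, e2, e3]

-- counter semantics of _last_pair: the fold at depth 0 ends with .1 = s-shifted last pair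
theorem pvLast_fold : ∀ (n : Nat) (cs : List Char), cs.length ≤ n →
    ∀ (s : Int) (last : Option (Int × Int)) (o : Int),
    ((PySem.List.enumerate cs s).foldl pvStepB (last, o, 0)).1
      = (match pvLastB cs with
         | none => last
         | some (x, y) => some (s + (x : Int), s + (y : Int))) := by
  intro n
  induction n with
  | zero =>
      intro cs hcs s last o
      have hnil : cs = [] := List.eq_nil_of_length_eq_zero (by omega)
      subst hnil; simp [pvLastB, PySem.List.enumerate]
  | succ n ih =>
      intro cs hcs s last o
      match cs with
      | [] => simp [pvLastB, PySem.List.enumerate]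
      | c :: cs' =>
          have hlen' : cs'.length ≤ n := by simp at hcs; omega
          by_cases hc : c = '('
          · subst hc
            have hstep : pvStepB (last, o, 0) (s, '(') = (last, s, 1) := by simp [pvStepB]
            cases hm1 : pvMatchB cs' with
            | none =>
                have hL : pvLastB ('(' :: cs') = none := by rw [pvLastB_cons]; simp [hm1]
                rw [hL]
                simp only [PySem.List.enumerate_cons, List.foldl_cons, hstep]
                exact (pvMatch_fold cs'.length cs' le_rfl 1 (s + 1) last s le_rfl).1 hm1
            | some m =>
                have hdn : (cs'.drop (m + 1)).length ≤ n := le_trans (by simp) hlen'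
                have hdd : List.drop (1 + m + 1) ('(' :: cs') = List.drop (m + 1) cs' := by
                  rw [show 1 + m + 1 = (m + 1) + 1 by omega]; rfl
                have hjump := (pvMatch_fold cs'.length cs' le_rfl 1 (s + 1) last s le_rfl).2 m hm1
                rw [if_pos rfl] at hjump
                cases hm2 : pvLastB (cs'.drop (m + 1)) with
                | none =>
                    have hL : pvLastB ('(' :: cs') = some (0, 1 + m) := by
                      rw [pvLastB_cons]; simp [hm1, hdd, hm2]
                    rw [hL]
                    simp only [PySem.List.enumerate_cons, List.foldl_cons, hstep, hjump]
                    have h := ih (cs'.drop (m + 1)) hdn (s + 1 + (m : Int) + 1)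
                      (some (s, s + 1 + (m : Int))) s
                    rw [hm2] at h
                    rw [h]
                    push_cast
                    norm_num
                    ring
                | some p =>
                    obtain ⟨x, y⟩ := p
                    have hL : pvLastB ('(' :: cs') = some (1 + m + 1 + x, 1 + m + 1 + y) := by
                      rw [pvLastB_cons]; simp [hm1, hdd, hm2]
                    rw [hL]
                    simp only [PySem.List.enumerate_cons, List.foldl_cons, hstep, hjump]
                    have h := ih (cs'.drop (m + 1)) hdn (s + 1 + (m : Int) + 1)
                      (some (s, s + 1 + (m : Int))) s
                    rw [hm2] at h
                    rw [h]
                    simp only [Option.some.injEq, Prod.mk.injEq]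
                    constructor <;> (push_cast; ring)
          · have hstep : pvStepB (last, o, 0) (s, c) = (last, o, 0) := by
              by_cases hc2 : c = ')' <;> simp [pvStepB, hc, hc2]
            cases hm : pvLastB cs' with
            | none =>
                have hL : pvLastB (c :: cs') = none := by
                  rw [pvLastB_cons]; simp [hc, hm]
                rw [hL]
                simp only [PySem.List.enumerate_cons, List.foldl_cons, hstep]
                have h := ih cs' hlen' (s + 1) last o
                rw [hm] at h
                exact h
            | some p =>
                obtain ⟨x, y⟩ := p
                have hL : pvLastB (c :: cs') = some (x + 1, y + 1) := by
                  rw [pvLastB_cons]; simp [hc, hm]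
                rw [hL]
                simp only [PySem.List.enumerate_cons, List.foldl_cons, hstep]
                have h := ih cs' hlen' (s + 1) last o
                rw [hm] at h
                rw [h]
                simp only [Option.some.injEq, Prod.mk.injEq]
                constructor <;> (push_cast; ring)

-- A's two-step reformat (insert "\n ", then cut at the shifted ')') = B's single expression
theorem pvSlice_eq (conv : List Char) (a b : Int) (ha : 0 ≤ a) (hab : a < b)
    (hb : b < (conv.length : Int)) :
    PySem.List.slice (PySem.List.slice conv none (some a) ++ ['\n'] ++ [' ']
        ++ PySem.List.slice conv (some (a + 1)) none) none (some (b + 1)) ++ ['\n']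
      = PySem.List.slice conv none (some a) ++ ['\n', ' ']
        ++ PySem.List.slice conv (some (a + 1)) (some b) ++ ['\n'] := by
  rw [PySem.List.slice_to _ ha, PySem.List.slice_from _ (by omega),
      PySem.List.slice_to _ (by omega), PySem.List.slice_toNat _ (by omega) (by omega)]
  have h1N : (a + 1).toNat = a.toNat + 1 := by omega
  have hbN : (b + 1).toNat = b.toNat + 1 := by omega
  have hlen : (conv.take a.toNat).length = a.toNat := by
    rw [List.length_take]; omega
  rw [h1N, hbN]
  simp only [List.append_assoc, List.singleton_append]
  rw [List.take_append]
  rw [List.take_of_length_le (by omega)]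
  rw [hlen]
  rw [show b.toNat + 1 - a.toNat = (b.toNat - (a.toNat + 1)) + 1 + 1 by omega]
  simp only [List.cons_append, List.nil_append, List.take_succ_cons]
  simp [List.append_assoc]

theorem pvLine_eq (conv : List Char) : pvLineA conv = pvFixB conv := by
  unfold pvLineA pvFixB
  by_cases hst : PySem.Chars.startswith conv ['-']
  · simp only [hst, if_true]
    have hbr : getListBracket conv
        = ((PySem.List.enumerate conv 0).foldl pvStepA ([], [], 0)).1 := by
      unfold getListBracket
      exact congrArg Prod.fst
        (pvFoldIdx_eq_enumerate conv (fun st index ch => pvStepA st (index, ch)) ([], [], 0) ' ')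
    have hrel := pvInv conv 0 ([], [], 0) (none, 0, 0) le_rfl
      ((pvRel_mk 0 [] [] 0 none 0 0).mpr ⟨rfl, le_rfl, fun _ => rfl, by omega, Or.inl ⟨rfl, rfl⟩⟩)
    have hcnt := pvLast_fold conv.length conv le_rfl 0 none 0
    rcases hrel.2.2.2.2 with ⟨hA, hB⟩ | ⟨a, b, lb', hA, hB, ha, hab, hb⟩
    · have hLB : pvLastB conv = none := by
        rw [hB] at hcnt
        cases hL : pvLastB conv with
        | none => rfl
        | some p => obtain ⟨x, y⟩ := p; rw [hL] at hcnt; simp at hcnt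
      rw [hbr, hA, hLB]
      simp
    · cases hL : pvLastB conv with
      | none => rw [hL, hB] at hcnt; simp at hcnt
      | some p =>
          obtain ⟨x, y⟩ := p
          rw [hL, hB] at hcnt
          simp only [Option.some.injEq, Prod.mk.injEq] at hcnt
          obtain ⟨hx, hy⟩ := hcnt
          have hxx : a = (x : Int) := by omega
          have hyy : b = (y : Int) := by omega
          rw [hbr, hA]
          have hb' : b < (conv.length : Int) := by simpa using hb
          have hlen0 : (lb' ++ [[a, b]]).length > 0 := by simp
          rw [if_pos hlen0, PySem.List.pyGetD_neg_one_append_singleton]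
          have hg0 : PySem.List.pyGetD [a, b] 0 0 = a := PySem.List.pyGetD_zero_cons _ _ _
          have hg1 : PySem.List.pyGetD [a, b] 1 0 = b := by
            rw [show (1 : Int) = ((1 : Nat) : Int) by norm_num, PySem.List.pyGetD_natCast]
            rfl
          rw [hg0, hg1, pvSlice_eq conv a b ha hab hb', hxx, hyy]
  · simp [hst]

-- ===== VERDICT (by name: the statement is the Claim_ definition above) =====
theorem convertFromChatToSearch_spec : Claim_equal_convertFromChatToSearch := by
  intro text _
  show convertFromChatToSearch text = _
  unfold convertFromChatToSearch convertFromChatToSearch_alt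
  simp only []
  rw [pvFoldA_eq_map]
  exact congrArg (fun l => String.ofList (PySem.Chars.join ['\n'] l))
    (List.map_congr_left (fun x _ => pvLine_eq x))
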